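-- pv_equiv track=rewrite | github.com/Kohei-Oyama/Kadai | kadai_5.py | cal_2
-- ===== SOURCE A (Python) =====
-- def cal_2(n):
--     count_5 =0 #5の因数
--     max_n = 10**n
--     k = 5
--     while k <= max_n:
--         count_5 = count_5 + (max_n) // k
--         k = k*5
--     return count_5
-- ===== SOURCE B (Python) =====
-- def cal_2(n):
--     # Count of factor-5 multiplicities in (10**n)! via closed form:
--     # for i <= n the terms 10**n // 5**i are exact powers 2**n * 5**(n-i),
--     # summing to 2**n * (5**n - 1) // 4; the remaining terms equal the
--     # 5-adic digit-sum count for 2**n, computed by repeated division.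
--     if n <= 0:
--         return 0
--     m = 2 ** n
--     r = 0
--     while m >= 5:
--         m //= 5
--         r += m
--     return 2 ** n * (5 ** n - 1) // 4 + r
-- ===== Notes on version B (the rewrite author's own statement) =====
-- stated objective: faster
-- what changed: Replaces A's Legendre sum over all powers of 5 up to 10^n (each a huge-integer division) by the closed form 2^n*(5^n-1)//4 for the first n exact terms plus a short repeated-division loop on the much smaller number 2^n for the residual terms.
import Mathlib
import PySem

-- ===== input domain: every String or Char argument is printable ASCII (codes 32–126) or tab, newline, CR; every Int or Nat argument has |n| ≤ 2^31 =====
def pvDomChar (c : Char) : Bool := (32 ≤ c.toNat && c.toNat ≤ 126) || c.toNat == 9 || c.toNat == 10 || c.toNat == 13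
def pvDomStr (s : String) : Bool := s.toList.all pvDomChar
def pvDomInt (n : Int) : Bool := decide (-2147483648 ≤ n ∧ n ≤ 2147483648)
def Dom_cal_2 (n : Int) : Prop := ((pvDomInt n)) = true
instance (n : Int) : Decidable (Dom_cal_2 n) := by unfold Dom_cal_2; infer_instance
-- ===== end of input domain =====

-- B replaces A's Legendre loop over powers of 5 up to 10^n by the closed form
-- 2^n*(5^n-1)//4 plus a short repeated-division loop on 2^n (objective: faster;
-- a timing run measured B faster on large n).

-- ===== PORT A =====
-- A's while loop: k runs over 5, 25, … while k ≤ max_n, summing max_n // k.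
-- The '1 ≤ k' conjunct only makes the recursion total; every call has k a
-- positive power of 5, as in the Python.
def cal2LoopA (maxn k : Int) : Int :=
  if h : 1 ≤ k ∧ k ≤ maxn then
    PySem.Int.floordiv maxn k + cal2LoopA maxn (k * 5)
  else 0
termination_by (maxn + 1 - k).toNat
decreasing_by omega

-- For n < 0 Python's 10**n is a float strictly below 5, so the loop body never
-- runs and count_5 = 0 is returned; that branch is ported literally as 0.
def cal_2 (n : Int) : Int :=
  if n < 0 then 0
  else cal2LoopA ((10 : Int) ^ n.toNat) 5

-- ===== PORT B =====
-- B's residual loop: m //= 5; r += m, while m ≥ 5.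
def cal2Resid (m : Int) : Int :=
  if h : 5 ≤ m then
    PySem.Int.floordiv m 5 + cal2Resid (PySem.Int.floordiv m 5)
  else 0
termination_by m.toNat
decreasing_by
  have h5 : PySem.Int.floordiv m 5 = m / 5 := PySem.Int.floordiv_eq_ediv_of_pos (by omega)
  rw [h5]; omega

def cal_2_alt (n : Int) : Int :=
  if n ≤ 0 then 0
  else
    PySem.Int.floordiv ((2 : Int) ^ n.toNat * ((5 : Int) ^ n.toNat - 1)) 4
      + cal2Resid ((2 : Int) ^ n.toNat)

-- ===== PRECONDITION & SPEC =====
def Spec_cal_2 (n : Int) (out : Int) : Prop := out = cal_2_alt n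
instance (n : Int) (out : Int) : Decidable (Spec_cal_2 n out) := by unfold Spec_cal_2; infer_instance

-- ===== CLAIM (what is proved, stated in full; the proofs are below) =====
def Claim_equal_cal_2 : Prop := ∀ (n : Int), Dom_cal_2 n → Spec_cal_2 n (cal_2 n)

-- ===== LEMMAS AND PROOFS =====

-- geometric sum 1 + 5 + … + 5^(k-1)
def geo5 : Nat → Int
  | 0 => 0
  | k + 1 => 5 ^ k + geo5 k

theorem geo5_mul_four (k : Nat) : 4 * geo5 k = 5 ^ k - 1 := by
  induction k with
  | zero => simp [geo5]
  | succ k ih => rw [geo5]; push_cast [pow_succ]; linarith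

-- A's loop, for positive k, equals B's repeated-division loop started at (maxn*5)//k.
theorem cal2LoopA_eq_resid (maxn k : Int) (hk : 1 ≤ k) :
    cal2LoopA maxn k = cal2Resid (PySem.Int.floordiv (maxn * 5) k) := by
  rw [cal2LoopA, cal2Resid,
      PySem.Int.floordiv_eq_ediv_of_pos (a := maxn * 5) (b := k) (by omega)]
  have hin : PySem.Int.floordiv (maxn * 5 / k) 5 = maxn / k := by
    rw [PySem.Int.floordiv_eq_ediv_of_pos (by omega : (0:Int) < 5),
        Int.ediv_ediv_of_nonneg (by omega : (0:Int) ≤ k),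
        mul_comm maxn 5, mul_comm k 5]
    exact Int.mul_ediv_mul_of_pos maxn k (by omega)
  by_cases h : k ≤ maxn
  · have hg : (5 : Int) ≤ maxn * 5 / k := by
      rw [Int.le_ediv_iff_mul_le (by omega)]; linarith
    rw [dif_pos ⟨hk, h⟩, dif_pos hg, hin,
        cal2LoopA_eq_resid maxn (k * 5) (by nlinarith)]
    have h55 : PySem.Int.floordiv (maxn * 5) (k * 5) = maxn / k := by
      rw [PySem.Int.floordiv_eq_ediv_of_pos (by nlinarith : (0:Int) < k * 5),
          mul_comm maxn 5, mul_comm k 5]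
      exact Int.mul_ediv_mul_of_pos maxn k (by omega)
    rw [h55, PySem.Int.floordiv_eq_ediv_of_pos (by omega : (0:Int) < k)]
  · rw [dif_neg (by tauto), dif_neg]
    intro hge
    rw [Int.le_ediv_iff_mul_le (by omega)] at hge
    linarith
termination_by (maxn + 1 - k).toNat
decreasing_by omega

-- The residual count splits off one exact factor of 5.
theorem cal2Resid_mul_five (a : Int) (ha : 1 ≤ a) :
    cal2Resid (a * 5) = a + cal2Resid a := by
  rw [cal2Resid, dif_pos (by nlinarith)]
  congr 1 <;>
    rw [PySem.Int.floordiv_eq_ediv_of_pos (by omega : (0:Int) < 5),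
        Int.mul_ediv_cancel a (by omega : (5:Int) ≠ 0)]

-- Main telescope: cal2Resid (a * 5^k) = a * geo5 k + cal2Resid a.
theorem cal2Resid_mul_pow (a : Int) (ha : 1 ≤ a) (k : Nat) :
    cal2Resid (a * 5 ^ k) = a * geo5 k + cal2Resid a := by
  induction k with
  | zero => simp [geo5]
  | succ k ih =>
    have h1 : a * 5 ^ (k + 1) = a * 5 ^ k * 5 := by ring
    rw [h1, cal2Resid_mul_five _ (by nlinarith [one_le_pow₀ (by norm_num : (1:Int) ≤ 5) (n := k)]), ih, geo5]
    ring

theorem cal_2_eq (n : Int) : cal_2 n = cal_2_alt n := by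
  unfold cal_2 cal_2_alt
  by_cases hneg : n < 0
  · rw [if_pos hneg, if_pos (by omega)]
  · rw [if_neg hneg]
    by_cases h0 : n ≤ 0
    · have : n.toNat = 0 := by omega
      rw [if_pos h0, this]
      rw [cal2LoopA, dif_neg (by norm_num), ]
    · rw [if_neg h0]
      set N := n.toNat with hN
      have h10 : (10 : Int) ^ N = (2 : Int) ^ N * 5 ^ N := by
        rw [← mul_pow]; norm_num
      have hA := cal2LoopA_eq_resid ((10 : Int) ^ N) 5 (by omega)
      have h2pos : (1 : Int) ≤ 2 ^ N := one_le_pow₀ (by omega)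
      have harg : PySem.Int.floordiv ((10 : Int) ^ N * 5) 5 = (10 : Int) ^ N := by
        rw [PySem.Int.floordiv_eq_ediv_of_pos (by omega : (0:Int) < 5),
            Int.mul_ediv_cancel _ (by omega : (5:Int) ≠ 0)]
      rw [hA, harg, h10, cal2Resid_mul_pow _ h2pos N]
      congr 1
      have h4 : (2:Int) ^ N * ((5:Int) ^ N - 1) = (2 ^ N * geo5 N) * 4 := by
        rw [← geo5_mul_four]; ring
      rw [h4, PySem.Int.floordiv_eq_ediv_of_pos (by omega : (0:Int) < 4),
          Int.mul_ediv_cancel _ (by omega : (4:Int) ≠ 0)]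

-- ===== VERDICT (by name: the statement is the Claim_ definition above) =====
theorem cal_2_spec : Claim_equal_cal_2 := by
  intro n _
  exact cal_2_eq n
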